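-- pv_equiv track=rewrite | github.com/Scopeo/draftnrun | engine/agent/utils.py | _is_likely_base64
-- ===== SOURCE A (Python) =====
-- BASE64_CHARS = set("ABCDEFGHIJKLMNOPQRSTUVWXYZabcdefghijklmnopqrstuvwxyz0123456789+/=")
--
-- MIN_LENGTH = 500
--
-- def _is_likely_base64(s: str) -> bool:
--     """Lightning fast base64 detection using set operations."""
--     length = len(s)
--
--     # Quick length checks
--     if length < MIN_LENGTH or length % 4 != 0:
--         return False
--
--     # Check for valid base64 characters (fast set lookup)
--     # Handle padding separately
--     content = s.rstrip("=")
--     if not content or not all(c in BASE64_CHARS for c in content):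
--         return False
--
--     # Check padding is only at the end (max 2 '=' chars)
--     padding_count = length - len(content)
--     return padding_count <= 2
-- ===== SOURCE B (Python) =====
-- BASE64_CHARS = set("ABCDEFGHIJKLMNOPQRSTUVWXYZabcdefghijklmnopqrstuvwxyz0123456789+/=")
--
-- MIN_LENGTH = 500
--
-- def _is_likely_base64(s: str) -> bool:
--     """Single forward pass: validate chars while tracking the trailing '=' run,
--     instead of rstrip + membership loop + length subtraction."""
--     n = len(s)
--     if n < MIN_LENGTH or n % 4 != 0:
--         return False
--     run = 0              # length of the current trailing '=' run
--     saw_content = False  # some non-'=' character was seen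
--     for c in s:
--         if c not in BASE64_CHARS:
--             return False
--         if c == '=':
--             run += 1
--         else:
--             run = 0
--             saw_content = True
--     return saw_content and run <= 2
-- ===== Notes on version B (the rewrite author's own statement) =====
-- stated objective: simpler
-- what changed: Replaces A's rstrip('=') plus a separate all()-membership pass plus a length subtraction with a single forward scan that validates each character while tracking the trailing '=' run and whether any non-'=' content was seen.
import Mathlib
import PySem

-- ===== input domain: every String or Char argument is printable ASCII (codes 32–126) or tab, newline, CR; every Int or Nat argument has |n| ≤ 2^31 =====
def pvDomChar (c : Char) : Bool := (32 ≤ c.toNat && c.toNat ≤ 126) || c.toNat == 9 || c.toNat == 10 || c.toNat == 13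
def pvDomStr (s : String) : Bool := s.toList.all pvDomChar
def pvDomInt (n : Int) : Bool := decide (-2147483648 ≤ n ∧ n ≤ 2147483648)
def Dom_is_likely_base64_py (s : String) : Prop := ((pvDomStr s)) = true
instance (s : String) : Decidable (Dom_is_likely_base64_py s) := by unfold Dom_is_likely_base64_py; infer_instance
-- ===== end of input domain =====

-- B replaces A's rstrip + all()-membership pass + length subtraction by one forward scan
-- tracking the trailing '=' run (objective: simpler one-pass; same asymptotic cost).

-- ===== PORT A =====
-- module constant BASE64_CHARS, as a membership predicate on chars
def pvB64 (c : Char) : Bool :=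
  "ABCDEFGHIJKLMNOPQRSTUVWXYZabcdefghijklmnopqrstuvwxyz0123456789+/=".toList.contains c

def is_likely_base64_py (s : String) : Bool :=
  let length : Int := PySem.Str.len s
  if length < 500 ∨ PySem.Int.mod length 4 ≠ 0 then false
  else
    -- s.rstrip("="): drop the trailing run of '=' — exact hand port (PySem has no rstrip-with-chars)
    let content : List Char := (s.toList.reverse.dropWhile (· == '=')).reverse
    if content.isEmpty || !(content.all pvB64) then false
    else
      let padding_count : Int := length - (content.length : Int)
      decide (padding_count ≤ 2)

-- ===== PORT B =====
-- the for-loop of Source B: state (run, saw_content); early return False on an invalid char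
def pvAltLoop : List Char → Nat → Bool → Bool
  | [], run, saw_content => saw_content && decide (run ≤ 2)
  | c :: cs, run, saw_content =>
    if !pvB64 c then false
    else if c = '=' then pvAltLoop cs (run + 1) saw_content
    else pvAltLoop cs 0 true

def is_likely_base64_py_alt (s : String) : Bool :=
  let n : Int := PySem.Str.len s
  if n < 500 ∨ PySem.Int.mod n 4 ≠ 0 then false
  else pvAltLoop s.toList 0 false

-- ===== PRECONDITION & SPEC =====
def Spec_is_likely_base64_py (s : String) (out : Bool) : Prop := out = is_likely_base64_py_alt s
instance (s : String) (out : Bool) : Decidable (Spec_is_likely_base64_py s out) := by unfold Spec_is_likely_base64_py; infer_instance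

-- ===== CLAIM (what is proved, stated in full; the proofs are below) =====
def Claim_equal_is_likely_base64_py : Prop := ∀ (s : String), Dom_is_likely_base64_py s → Spec_is_likely_base64_py s (is_likely_base64_py s)

-- ===== LEMMAS AND PROOFS =====

theorem pv_tk_app_all {p : Char → Bool} (xs ys : List Char) (h : xs.all p) :
    (xs ++ ys).takeWhile p = xs ++ ys.takeWhile p := by
  induction xs with
  | nil => simp
  | cons a as ih =>
    simp only [List.all_cons, Bool.and_eq_true] at h
    simp [h.1, ih h.2]

theorem pv_tk_app_not {p : Char → Bool} (xs ys : List Char) (h : ¬ xs.all p = true) :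
    (xs ++ ys).takeWhile p = xs.takeWhile p := by
  induction xs with
  | nil => simp at h
  | cons a as ih =>
    by_cases ha : p a
    · simp only [List.all_cons, ha, Bool.true_and] at h
      simp [ha, ih h]
    · simp [ha]

-- characterization of B's loop (started in any (run, saw_content) state)
theorem pvAltLoop_spec (l : List Char) (run : Nat) (saw : Bool) :
    pvAltLoop l run saw =
      if ¬ l.all pvB64 then false
      else if l.all (· == '=') then saw && decide (run + l.length ≤ 2)
      else decide ((l.reverse.takeWhile (· == '=')).length ≤ 2) := by
  induction l generalizing run saw with
  | nil => simp [pvAltLoop]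
  | cons c cs ih =>
    by_cases hB : pvB64 c
    · by_cases hc : c = '='
      · subst hc
        by_cases hall : cs.all (· == '=')
        · rw [pvAltLoop, if_neg (by simp [hB]), if_pos rfl, ih]
          have h1 : ('=' :: cs).all pvB64 = cs.all pvB64 := by simp [List.all_cons, hB]
          have h2 : (('=' :: cs).all (· == '=')) = true := by simp [List.all_cons, hall]
          have h3 : run + 1 + cs.length = run + ('=' :: cs).length := by simp; omega
          rw [h1, h2, if_pos rfl, hall, if_pos rfl, h3]
        · have hrev : ¬ (cs.reverse).all (· == '=') = true := by
            simpa [List.all_reverse] using hall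
          have htk : (('=' :: cs).reverse).takeWhile (· == '=') =
              (cs.reverse).takeWhile (· == '=') := by
            rw [List.reverse_cons, pv_tk_app_not _ _ hrev]
          rw [pvAltLoop, if_neg (by simp [hB]), if_pos rfl, ih]
          have h1 : ('=' :: cs).all pvB64 = cs.all pvB64 := by simp [List.all_cons, hB]
          have h2 : (('=' :: cs).all (· == '=')) = false := by
            simp [List.all_cons]; simpa using hall
          rw [h1, h2, if_neg hall, htk]
          simp
      · have hne : ((c :: cs).all (· == '=')) = false := by
          simp [List.all_cons, hc]
        rw [pvAltLoop, if_neg (by simp [hB]), if_neg hc, ih]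
        have h1 : (c :: cs).all pvB64 = cs.all pvB64 := by simp [List.all_cons, hB]
        rw [h1, hne]
        by_cases hall : cs.all (· == '=')
        · have hrev : (cs.reverse).all (· == '=') = true := by
            simpa [List.all_reverse] using hall
          have htk : ((c :: cs).reverse).takeWhile (· == '=') = cs.reverse := by
            rw [List.reverse_cons, pv_tk_app_all _ _ hrev]
            simp [hc]
          have hcsB : cs.all pvB64 = true := by
            refine List.all_eq_true.2 (fun x hx => ?_)
            have : x = '=' := by simpa using List.all_eq_true.1 hall x hx
            subst this; decide
          rw [hcsB, hall, if_pos rfl]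
          simp only [if_false, Bool.false_eq_true, not_true_eq_false,
            Bool.true_and, htk, List.length_reverse]
          simp
        · have hrev : ¬ (cs.reverse).all (· == '=') = true := by
            simpa [List.all_reverse] using hall
          have htk : ((c :: cs).reverse).takeWhile (· == '=') =
              (cs.reverse).takeWhile (· == '=') := by
            rw [List.reverse_cons, pv_tk_app_not _ _ hrev]
          rw [if_neg hall, htk]
          simp
    · rw [pvAltLoop, if_pos (by simp [hB])]
      have : (c :: cs).all pvB64 = false := by simp [List.all_cons, hB]
      rw [this]
      simp

-- A's content is all-valid iff all of s is (trailing '=' are themselves valid)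
theorem pv_content_all (l : List Char) :
    (((l.reverse.dropWhile (· == '=')).reverse).all pvB64) = l.all pvB64 := by
  conv_rhs => rw [← l.reverse_reverse,
    ← List.takeWhile_append_dropWhile (p := (· == '=')) (l := l.reverse)]
  have htk : ((l.reverse.takeWhile (· == '='))).all pvB64 := by
    refine List.all_eq_true.2 (fun x hx => ?_)
    have : x = '=' := by simpa using List.mem_takeWhile_imp hx
    subst this; decide
  simp only [List.reverse_append, List.all_append, List.all_reverse, htk, Bool.and_true]

-- length bookkeeping: len(s) = padding run + len(content)
theorem pv_content_len (l : List Char) :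
    l.length = (l.reverse.takeWhile (· == '=')).length
      + ((l.reverse.dropWhile (· == '=')).reverse).length := by
  have h := congrArg List.length
    (List.takeWhile_append_dropWhile (p := (· == '=')) (l := l.reverse))
  simp only [List.length_append, List.length_reverse] at h ⊢
  omega

-- content is empty iff s is all '='
theorem pv_content_empty (l : List Char) :
    ((l.reverse.dropWhile (· == '=')).reverse).isEmpty = l.all (· == '=') := by
  by_cases h : l.all (· == '=')
  · have hall : ∀ x ∈ l.reverse, (x == '=') = true := by
      intro x hx
      exact List.all_eq_true.1 h x (by simpa using hx)
    rw [List.dropWhile_eq_nil_iff.2 hall]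
    simp [h]
  · have hne : l.reverse.dropWhile (· == '=') ≠ [] := by
      intro hnil
      apply h
      refine List.all_eq_true.2 (fun x hx => ?_)
      exact List.dropWhile_eq_nil_iff.1 hnil x (by simpa using hx)
    have : (l.all (· == '=')) = false := by simpa using h
    rw [this]
    simpa [List.isEmpty_iff] using hne

-- ===== VERDICT (by name: the statement is the Claim_ definition above) =====
theorem is_likely_base64_py_spec : Claim_equal_is_likely_base64_py := by
  intro s _hDom
  unfold Spec_is_likely_base64_py is_likely_base64_py is_likely_base64_py_alt
  by_cases hg : PySem.Str.len s < 500 ∨ PySem.Int.mod (PySem.Str.len s) 4 ≠ 0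
  · rw [if_pos hg, if_pos hg]
  · rw [if_neg hg, if_neg hg, pvAltLoop_spec]
    set l := s.toList with hl
    have hlen : PySem.Str.len s = (l.length : Int) := by
      simp [PySem.Str.len_eq, hl]
    by_cases hall : l.all pvB64
    · by_cases heq : l.all (· == '=')
      · have : ((l.reverse.dropWhile (· == '=')).reverse).isEmpty = true := by
          rw [pv_content_empty, heq]
        rw [if_pos (by rw [this]; simp), if_neg (by simp [hall]), if_pos heq]
        simp
      · have hne : ((l.reverse.dropWhile (· == '=')).reverse).isEmpty = false := by
          rw [pv_content_empty]; simpa using heq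
        have hcall : (((l.reverse.dropWhile (· == '=')).reverse).all pvB64) = true := by
          rw [pv_content_all, hall]
        rw [if_neg (by rw [hne, hcall]; simp), if_neg (by simp [hall]), if_neg heq]
        have hL := pv_content_len l
        simp only [List.length_reverse] at hL
        simp only [PySem.Str.len_eq, List.length_reverse, decide_eq_decide]
        rw [← hl]
        omega
    · have hcall : (((l.reverse.dropWhile (· == '=')).reverse).all pvB64) = false := by
        rw [pv_content_all]; simpa using hall
      rw [if_pos (by rw [hcall]; simp), if_pos (by simpa using hall)]
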